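-- pv_equiv track=rewrite | github.com/nikolaypavlov/dante | scripts/render_html.py | get_nav
-- ===== SOURCE A (Python) =====
-- CANTICA_SEQUENCE = [
--     ("Inferno", "inf", "Inf.", 34),
--     ("Purgatorio", "purg", "Purg.", 33),
--     ("Paradiso", "par", "Par.", 33),
-- ]
--
-- def int_to_roman(n: int) -> str:
--     result = []
--     for value, numeral in [
--         (1000, "M"),
--         (900, "CM"),
--         (500, "D"),
--         (400, "CD"),
--         (100, "C"),
--         (90, "XC"),
--         (50, "L"),
--         (40, "XL"),
--         (10, "X"),
--         (9, "IX"),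
--         (5, "V"),
--         (4, "IV"),
--         (1, "I"),
--     ]:
--         while n >= value:
--             result.append(numeral)
--             n -= value
--     return "".join(result)
--
-- def build_full_sequence() -> list[tuple[str, str, str, int]]:
--     """Return the full 100-canto sequence as (prefix, abbrev, cantica, num)."""
--     seq = []
--     for cantica, prefix, abbrev, count in CANTICA_SEQUENCE:
--         for num in range(1, count + 1):
--             seq.append((prefix, abbrev, cantica, num))
--     return seq
--
-- def get_nav(prefix: str, num: int) -> tuple[str, str]:
--     """Return (prev_link_html, next_link_html) for navigation arrows."""
--     seq = build_full_sequence()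
--     current_idx = None
--     for i, (p, _a, _c, n) in enumerate(seq):
--         if p == prefix and n == num:
--             current_idx = i
--             break
--
--     if current_idx is None:
--         return ('<span class="nav-arrow"></span>', '<span class="nav-arrow"></span>')
--
--     if current_idx == 0:
--         prev_html = '<span class="nav-arrow"></span>'
--     else:
--         pp, pa, _pc, pn = seq[current_idx - 1]
--         prev_file = f"{pp}_{pn:02d}"
--         prev_label = f"{pa} {int_to_roman(pn)}"
--         prev_html = (
--             f'<a class="nav-arrow" href="{prev_file}.html">\u2190 {prev_label}</a>'
--         )
--
--     if current_idx == len(seq) - 1: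
--         next_html = '<span class="nav-arrow"></span>'
--     else:
--         np, na, _nc, nn = seq[current_idx + 1]
--         next_file = f"{np}_{nn:02d}"
--         next_label = f"{na} {int_to_roman(nn)}"
--         next_html = (
--             f'<a class="nav-arrow" href="{next_file}.html">{next_label} \u2192</a>'
--         )
--
--     return prev_html, next_html
-- ===== SOURCE B (Python) =====
-- CANTICA_SEQUENCE = [
--     ("Inferno", "inf", "Inf.", 34),
--     ("Purgatorio", "purg", "Purg.", 33),
--     ("Paradiso", "par", "Par.", 33),
-- ]
--
-- _ARROW = '<span class="nav-arrow"></span>'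
--
--
-- def _roman(n):
--     # enough for 0 <= n <= 39, the only canto numbers that occur
--     ones = ["", "I", "II", "III", "IV", "V", "VI", "VII", "VIII", "IX"]
--     return "X" * (n // 10) + ones[n % 10]
--
--
-- def _link(prefix, abbrev, n, is_prev):
--     target = f"{prefix}_{n:02d}.html"
--     label = f"{abbrev} {_roman(n)}"
--     if is_prev:
--         return f'<a class="nav-arrow" href="{target}">\u2190 {label}</a>'
--     return f'<a class="nav-arrow" href="{target}">{label} \u2192</a>'
--
--
-- def get_nav(prefix: str, num: int) -> tuple[str, str]:
--     idx = None
--     for i, (_c, p, _a, _n) in enumerate(CANTICA_SEQUENCE):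
--         if p == prefix:
--             idx = i
--             break
--     if idx is None or not (1 <= num <= CANTICA_SEQUENCE[idx][3]):
--         return (_ARROW, _ARROW)
--     abbrev = CANTICA_SEQUENCE[idx][2]
--     count = CANTICA_SEQUENCE[idx][3]
--     if num > 1:
--         prev_html = _link(prefix, abbrev, num - 1, True)
--     elif idx > 0:
--         _pc, pp, pa, pn = CANTICA_SEQUENCE[idx - 1]
--         prev_html = _link(pp, pa, pn, True)
--     else:
--         prev_html = _ARROW
--     if num < count:
--         next_html = _link(prefix, abbrev, num + 1, False)
--     elif idx < len(CANTICA_SEQUENCE) - 1: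
--         _nc, np_, na, _nn = CANTICA_SEQUENCE[idx + 1]
--         next_html = _link(np_, na, 1, False)
--     else:
--         next_html = _ARROW
--     return (prev_html, next_html)
-- ===== Notes on version B (the rewrite author's own statement) =====
-- stated objective: simpler
-- what changed: B drops A's materialised 100-canto sequence and linear scan, instead looking the prefix up in the 3-row cantica table and computing the previous/next canto by +-1 arithmetic with explicit cross-cantica boundary cases; the roman-numeral helper becomes a tens/ones table lookup.
import Mathlib
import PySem

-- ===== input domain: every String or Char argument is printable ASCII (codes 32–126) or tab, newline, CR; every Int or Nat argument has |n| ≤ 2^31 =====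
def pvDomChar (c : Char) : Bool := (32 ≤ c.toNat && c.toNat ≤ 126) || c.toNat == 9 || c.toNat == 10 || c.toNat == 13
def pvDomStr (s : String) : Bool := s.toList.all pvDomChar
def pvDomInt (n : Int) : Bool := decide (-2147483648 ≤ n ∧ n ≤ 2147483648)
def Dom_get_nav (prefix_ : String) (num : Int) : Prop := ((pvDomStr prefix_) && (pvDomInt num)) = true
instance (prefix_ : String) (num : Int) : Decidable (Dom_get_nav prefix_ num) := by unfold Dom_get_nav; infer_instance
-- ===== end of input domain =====

-- B replaces A's materialised 100-canto sequence and linear scan by a 3-row table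
-- lookup plus ±1 arithmetic on the canto number (objective: simpler).

-- ===== PORT A =====
def CANTICA_SEQUENCE : List (String × String × String × Int) :=
  [("Inferno", "inf", "Inf.", 34), ("Purgatorio", "purg", "Purg.", 33), ("Paradiso", "par", "Par.", 33)]

-- Python's inner `while n >= value: result.append(numeral); n -= value`.
-- The `0 < value` guard only makes the recursion total; every table value is positive.
-- fuel n.toNat + 1 suffices: each iteration subtracts value ≥ 1 from n
def romanWhile (fuel : Nat) (value : Int) (numeral : String) (n : Int) (acc : List String) : Int × List String :=
  match fuel with
  | 0 => (n, acc)
  | fuel + 1 => if value ≤ n then romanWhile fuel value numeral (n - value) (acc ++ [numeral]) else (n, acc)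

def int_to_roman (n : Int) : String :=
  let pairs : List (Int × String) :=
    [(1000, "M"), (900, "CM"), (500, "D"), (400, "CD"), (100, "C"), (90, "XC"),
     (50, "L"), (40, "XL"), (10, "X"), (9, "IX"), (5, "V"), (4, "IV"), (1, "I")]
  let res := pairs.foldl (fun (st : Int × List String) p => romanWhile (st.1.toNat + 1) p.1 p.2 st.1 st.2) (n, [])
  String.join res.2
def build_full_sequence : List (String × String × String × Int) :=
  CANTICA_SEQUENCE.foldl (fun seq row =>
    (PySem.List.pyRange 1 (row.2.2.2 + 1) 1).foldl
      (fun s num => s ++ [(row.2.1, row.2.2.1, row.1, num)]) seq) []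

def findLoopA (prefix_ : String) (num : Int) : List (String × String × String × Int) → Nat → Option Nat
  | [], _ => none
  | x :: rest, i => if x.1 = prefix_ ∧ x.2.2.2 = num then some i else findLoopA prefix_ num rest (i + 1)

-- Python's f"{n:02d}" for the nonnegative numbers that occur here
def pad2 (n : Int) : String :=
  let s := PySem.Int.toStr n
  if PySem.Str.len s < 2 then "0" ++ s else s

def get_nav (prefix_ : String) (num : Int) : String × String :=
  match findLoopA prefix_ num build_full_sequence 0 with
  | none => ("<span class=\"nav-arrow\"></span>", "<span class=\"nav-arrow\"></span>")
  | some idx =>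
    let prevHtml :=
      if idx = 0 then "<span class=\"nav-arrow\"></span>"
      else
        let row := (PySem.List.pyGet? build_full_sequence ((idx : Int) - 1)).getD ("", "", "", 0)
        "<a class=\"nav-arrow\" href=\"" ++ row.1 ++ "_" ++ pad2 row.2.2.2 ++ ".html\">← "
          ++ row.2.1 ++ " " ++ int_to_roman row.2.2.2 ++ "</a>"
    let nextHtml :=
      if idx = build_full_sequence.length - 1 then "<span class=\"nav-arrow\"></span>"
      else
        let row := (PySem.List.pyGet? build_full_sequence ((idx : Int) + 1)).getD ("", "", "", 0)
        "<a class=\"nav-arrow\" href=\"" ++ row.1 ++ "_" ++ pad2 row.2.2.2 ++ ".html\">"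
          ++ row.2.1 ++ " " ++ int_to_roman row.2.2.2 ++ " →</a>"
    (prevHtml, nextHtml)

-- ===== PORT B =====
def bARROW : String := "<span class=\"nav-arrow\"></span>"

def bRepXAux : Nat → String
  | 0 => ""
  | k + 1 => "X" ++ bRepXAux k

-- Python's `"X" * k` (empty for k ≤ 0)
def bRepX (k : Int) : String := bRepXAux k.toNat

-- Python B's `"X" * (n // 10) + ones[n % 10]`
def bRoman (n : Int) : String :=
  let ones := ["", "I", "II", "III", "IV", "V", "VI", "VII", "VIII", "IX"]
  bRepX (PySem.Int.floordiv n 10) ++ (PySem.List.pyGet? ones (PySem.Int.mod n 10)).getD ""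

def bLink (prefix_ abbr : String) (n : Int) (isPrev : Bool) : String :=
  let target := prefix_ ++ "_" ++ pad2 n ++ ".html"
  let label := abbr ++ " " ++ bRoman n
  if isPrev then "<a class=\"nav-arrow\" href=\"" ++ target ++ "\">← " ++ label ++ "</a>"
  else "<a class=\"nav-arrow\" href=\"" ++ target ++ "\">" ++ label ++ " →</a>"

def bFindIdx (prefix_ : String) : List (String × String × String × Int) → Nat → Option Nat
  | [], _ => none
  | row :: rest, i => if row.2.1 = prefix_ then some i else bFindIdx prefix_ rest (i + 1)

def get_nav_alt (prefix_ : String) (num : Int) : String × String :=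
  match bFindIdx prefix_ CANTICA_SEQUENCE 0 with
  | none => (bARROW, bARROW)
  | some idx =>
    let row := (PySem.List.pyGet? CANTICA_SEQUENCE (idx : Int)).getD ("", "", "", 0)
    let abbr := row.2.2.1
    let count := row.2.2.2
    if ¬(1 ≤ num ∧ num ≤ count) then (bARROW, bARROW)
    else
      let prevHtml :=
        if num > 1 then bLink prefix_ abbr (num - 1) true
        else if idx > 0 then
          let prow := (PySem.List.pyGet? CANTICA_SEQUENCE ((idx : Int) - 1)).getD ("", "", "", 0)
          bLink prow.2.1 prow.2.2.1 prow.2.2.2 true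
        else bARROW
      let nextHtml :=
        if num < count then bLink prefix_ abbr (num + 1) false
        else if idx < CANTICA_SEQUENCE.length - 1 then
          let nrow := (PySem.List.pyGet? CANTICA_SEQUENCE ((idx : Int) + 1)).getD ("", "", "", 0)
          bLink nrow.2.1 nrow.2.2.1 1 false
        else bARROW
      (prevHtml, nextHtml)

-- ===== PRECONDITION & SPEC =====
def Spec_get_nav (prefix_ : String) (num : Int) (out : String × String) : Prop := out = get_nav_alt prefix_ num
instance (prefix_ : String) (num : Int) (out : String × String) : Decidable (Spec_get_nav prefix_ num out) := by unfold Spec_get_nav; infer_instance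

-- ===== CLAIM (what is proved, stated in full; the proofs are below) =====
def Claim_equal_get_nav : Prop := ∀ (prefix_ : String) (num : Int), Dom_get_nav prefix_ num → Spec_get_nav prefix_ num (get_nav prefix_ num)

-- ===== LEMMAS AND PROOFS =====

lemma findLoopA_none (prefix_ : String) (num : Int) (l : List (String × String × String × Int))
    (h : ∀ x ∈ l, ¬(x.1 = prefix_ ∧ x.2.2.2 = num)) (i : Nat) :
    findLoopA prefix_ num l i = none := by
  induction l generalizing i with
  | nil => rfl
  | cons hd tl ih =>
    rw [findLoopA, if_neg (h hd (List.mem_cons_self ..))]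
    exact ih (fun x hx => h x (List.mem_cons_of_mem _ hx)) _

set_option maxRecDepth 4000 in
lemma seq_shape : ∀ x ∈ build_full_sequence,
    (x.1 = "inf" ∧ 1 ≤ x.2.2.2 ∧ x.2.2.2 ≤ 34) ∨
    (x.1 = "purg" ∧ 1 ≤ x.2.2.2 ∧ x.2.2.2 ≤ 33) ∨
    (x.1 = "par" ∧ 1 ≤ x.2.2.2 ∧ x.2.2.2 ≤ 33) := by decide

lemma get_nav_spans (prefix_ : String) (num : Int)
    (h : ∀ x ∈ build_full_sequence, ¬(x.1 = prefix_ ∧ x.2.2.2 = num)) :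
    get_nav prefix_ num = ("<span class=\"nav-arrow\"></span>", "<span class=\"nav-arrow\"></span>") := by
  unfold get_nav
  rw [findLoopA_none prefix_ num _ h 0]

set_option maxRecDepth 4000 in
lemma inf_range : ∀ k ∈ PySem.List.pyRange 1 35 1, get_nav "inf" k = get_nav_alt "inf" k := by decide
set_option maxRecDepth 4000 in
lemma purg_range : ∀ k ∈ PySem.List.pyRange 1 34 1, get_nav "purg" k = get_nav_alt "purg" k := by decide
set_option maxRecDepth 4000 in
lemma par_range : ∀ k ∈ PySem.List.pyRange 1 34 1, get_nav "par" k = get_nav_alt "par" k := by decide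

lemma alt_spans_inf (num : Int) (hr : ¬(1 ≤ num ∧ num ≤ 34)) :
    get_nav_alt "inf" num = (bARROW, bARROW) := by
  simp [get_nav_alt, bFindIdx, CANTICA_SEQUENCE, PySem.List.pyGet?, PySem.List.pyIdx?, hr]

lemma alt_spans_purg (num : Int) (hr : ¬(1 ≤ num ∧ num ≤ 33)) :
    get_nav_alt "purg" num = (bARROW, bARROW) := by
  simp [get_nav_alt, bFindIdx, CANTICA_SEQUENCE, PySem.List.pyGet?, PySem.List.pyIdx?, hr]

lemma alt_spans_par (num : Int) (hr : ¬(1 ≤ num ∧ num ≤ 33)) :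
    get_nav_alt "par" num = (bARROW, bARROW) := by
  simp [get_nav_alt, bFindIdx, CANTICA_SEQUENCE, PySem.List.pyGet?, PySem.List.pyIdx?, hr]

lemma alt_spans_other (prefix_ : String) (num : Int)
    (h1 : prefix_ ≠ "inf") (h2 : prefix_ ≠ "purg") (h3 : prefix_ ≠ "par") :
    get_nav_alt prefix_ num = (bARROW, bARROW) := by
  simp [get_nav_alt, bFindIdx, CANTICA_SEQUENCE, Ne.symm h1, Ne.symm h2, Ne.symm h3]

-- ===== VERDICT (by name: the statement is the Claim_ definition above) =====
theorem get_nav_spec : Claim_equal_get_nav := by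
  intro prefix_ num _
  unfold Spec_get_nav
  by_cases h1 : prefix_ = "inf"
  · subst h1
    by_cases hr : 1 ≤ num ∧ num ≤ 34
    · exact inf_range num (PySem.List.mem_pyRange_one.mpr ⟨hr.1, by omega⟩)
    · have hA := get_nav_spans "inf" num (by
        rintro x hx ⟨e1, e2⟩
        rcases seq_shape x hx with ⟨p1, p2, p3⟩ | ⟨p1, p2, p3⟩ | ⟨p1, p2, p3⟩
        · omega
        · exact absurd (p1 ▸ e1) (by decide)
        · exact absurd (p1 ▸ e1) (by decide))
      rw [alt_spans_inf num hr, hA]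
      rfl
  by_cases h2 : prefix_ = "purg"
  · subst h2
    by_cases hr : 1 ≤ num ∧ num ≤ 33
    · exact purg_range num (PySem.List.mem_pyRange_one.mpr ⟨hr.1, by omega⟩)
    · have hA := get_nav_spans "purg" num (by
        rintro x hx ⟨e1, e2⟩
        rcases seq_shape x hx with ⟨p1, p2, p3⟩ | ⟨p1, p2, p3⟩ | ⟨p1, p2, p3⟩
        · exact absurd (p1 ▸ e1) (by decide)
        · omega
        · exact absurd (p1 ▸ e1) (by decide))
      rw [alt_spans_purg num hr, hA]
      rfl
  by_cases h3 : prefix_ = "par"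
  · subst h3
    by_cases hr : 1 ≤ num ∧ num ≤ 33
    · exact par_range num (PySem.List.mem_pyRange_one.mpr ⟨hr.1, by omega⟩)
    · have hA := get_nav_spans "par" num (by
        rintro x hx ⟨e1, e2⟩
        rcases seq_shape x hx with ⟨p1, p2, p3⟩ | ⟨p1, p2, p3⟩ | ⟨p1, p2, p3⟩
        · exact absurd (p1 ▸ e1) (by decide)
        · exact absurd (p1 ▸ e1) (by decide)
        · omega)
      rw [alt_spans_par num hr, hA]
      rfl
  · have hA := get_nav_spans prefix_ num (by
      rintro x hx ⟨e1, e2⟩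
      rcases seq_shape x hx with ⟨p1, p2, p3⟩ | ⟨p1, p2, p3⟩ | ⟨p1, p2, p3⟩
      · exact h1 (e1 ▸ p1)
      · exact h2 (e1 ▸ p1)
      · exact h3 (e1 ▸ p1))
    rw [alt_spans_other prefix_ num h1 h2 h3, hA]
    rfl
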